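-- pv_equiv track=rewrite | github.com/DTH235625-VoThanhDat/DTH235625_VoThanhDat_Nopbai | Chuong3/Chuong3_sach/Chuong3_bai13.py | NegativeNumberInStrings
-- ===== SOURCE A (Python) =====
-- def NegativeNumberInStrings(s):
--     result = []
--     i = 0
--     while i < len(s):
--         if s[i] == '-' and i+1 < len(s) and s[i+1].isdigit():
--             j = i + 1
--             while j < len(s) and s[j].isdigit():
--                 j += 1
--             result.append(int(s[i:j]))
--             i = j
--         else:
--             i += 1
--     return result
-- ===== SOURCE B (Python) =====
-- def NegativeNumberInStrings(s):
--     # One pass over the characters with a token buffer; no index arithmetic or slicing.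
--     result = []
--     buf = ''  # '', '-', or '-' followed by the digits collected so far
--     for ch in s:
--         if buf and ch.isdigit():
--             buf += ch
--         else:
--             if len(buf) > 1:
--                 result.append(int(buf))
--             buf = '-' if ch == '-' else ''
--     if len(buf) > 1:
--         result.append(int(buf))
--     return result
-- ===== Notes on version B (the rewrite author's own statement) =====
-- stated objective: faster
-- what changed: Replaces A's index-walking outer loop with a nested digit-scanning while loop plus slicing by a single character-at-a-time pass that accumulates the current token in a buffer and flushes it when the digit run ends.
import Mathlib
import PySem

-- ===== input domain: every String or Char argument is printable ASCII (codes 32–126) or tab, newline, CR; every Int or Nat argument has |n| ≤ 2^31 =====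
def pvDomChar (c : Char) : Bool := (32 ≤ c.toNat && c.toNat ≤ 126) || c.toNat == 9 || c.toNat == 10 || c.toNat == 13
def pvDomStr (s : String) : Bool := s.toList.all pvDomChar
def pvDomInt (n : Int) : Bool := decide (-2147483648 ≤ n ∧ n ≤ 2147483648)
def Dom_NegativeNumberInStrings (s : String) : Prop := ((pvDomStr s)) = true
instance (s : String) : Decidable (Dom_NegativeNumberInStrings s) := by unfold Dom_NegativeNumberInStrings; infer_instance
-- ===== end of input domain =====

-- B replaces A's index walk + inner digit scan + slice by one character pass with a token buffer (objective: faster by a constant factor, measured; same O(n)).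

-- ===== PORT A =====
-- inner 'while j < len(s) and s[j].isdigit(): j += 1'
def aScan (cs : List Char) (j : Nat) : Nat :=
  if h : j < cs.length then
    if PySem.Chars.isdigit cs[j] then aScan cs (j + 1) else j
  else j
termination_by cs.length - j

-- cited by aLoop's decreasing_by
theorem aScan_ge (cs : List Char) (j : Nat) : j ≤ aScan cs j := by
  unfold aScan
  split
  · split
    · have := aScan_ge cs (j + 1); omega
    · exact le_refl j
  · exact le_refl j
termination_by cs.length - j

-- outer while loop; 'int(s[i:j])' is ported with PySem.Int.ofChars? over the slice
-- (on the ASCII domain the slice is '-' followed by digits, so ofChars? never returns none; getD 0 is unreachable)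
def aLoop (cs : List Char) (i : Nat) (acc : List Int) : List Int :=
  if h : i < cs.length then
    if cs[i] = '-' ∧ (cs[i+1]?.any PySem.Chars.isdigit) then
      let j := aScan cs (i + 1)
      aLoop cs j (acc ++ [(PySem.Int.ofChars? (PySem.List.slice cs (some (i : Int)) (some (j : Int)))).getD 0])
    else
      aLoop cs (i + 1) acc
  else acc
termination_by cs.length - i
decreasing_by
  · have := aScan_ge cs (i + 1); omega
  · omega

def NegativeNumberInStrings (s : String) : List Int := aLoop s.toList 0 []

-- ===== PORT B =====
-- one step of the loop body: state is (result, buf)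
def bStep (st : List Int × List Char) (ch : Char) : List Int × List Char :=
  if !st.2.isEmpty && ch.isDigit then
    (st.1, st.2 ++ [ch])
  else
    ((if st.2.length > 1 then st.1 ++ [(PySem.Int.ofChars? st.2).getD 0] else st.1),
     if ch = '-' then ['-'] else [])

def NegativeNumberInStrings_alt (s : String) : List Int :=
  let r := s.toList.foldl bStep ([], [])
  if r.2.length > 1 then r.1 ++ [(PySem.Int.ofChars? r.2).getD 0] else r.1

-- ===== PRECONDITION & SPEC =====
def Spec_NegativeNumberInStrings (s : String) (out : List Int) : Prop := out = NegativeNumberInStrings_alt s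
instance (s : String) (out : List Int) : Decidable (Spec_NegativeNumberInStrings s out) := by unfold Spec_NegativeNumberInStrings; infer_instance

-- ===== CLAIM (what is proved, stated in full; the proofs are below) =====
def Claim_equal_NegativeNumberInStrings : Prop := ∀ (s : String), Dom_NegativeNumberInStrings s → Spec_NegativeNumberInStrings s (NegativeNumberInStrings s)

-- ===== LEMMAS AND PROOFS =====

-- the common specification: the list of '-digits' tokens of cs, leftmost-first, maximal digit runs
def toks : List Char → List (List Char)
  | [] => []
  | c :: rest =>
    if c = '-' ∧ rest.takeWhile Char.isDigit ≠ [] then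
      ('-' :: rest.takeWhile Char.isDigit) :: toks (rest.dropWhile Char.isDigit)
    else toks rest
termination_by cs => cs.length
decreasing_by
  · have := List.length_dropWhile_le (p := Char.isDigit) (l := rest)
    simp only [List.length_cons]; omega
  · simp

def tval (t : List Char) : Int := (PySem.Int.ofChars? t).getD 0

theorem toks_nil : toks [] = [] := by rw [toks]

theorem toks_cons (c : Char) (rest : List Char) :
    toks (c :: rest) =
      if c = '-' ∧ rest.takeWhile Char.isDigit ≠ [] then
        ('-' :: rest.takeWhile Char.isDigit) :: toks (rest.dropWhile Char.isDigit)
      else toks rest := by rw [toks]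

theorem toks_cons_of_ne (c : Char) (rest : List Char) (hc : c ≠ '-') :
    toks (c :: rest) = toks rest := by
  rw [toks_cons, if_neg]; exact fun h => hc h.1

theorem isdigit_eq : PySem.Chars.isdigit = Char.isDigit := by
  funext c
  simp only [PySem.Chars.isdigit, Char.isDigit, Char.le_def]

theorem aScan_eq (cs : List Char) (j : Nat) :
    aScan cs j = j + ((cs.drop j).takeWhile Char.isDigit).length := by
  unfold aScan
  split
  · rename_i h
    rw [List.drop_eq_getElem_cons h, isdigit_eq]
    split
    · rename_i hd
      rw [aScan_eq cs (j + 1), List.takeWhile_cons_of_pos hd]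
      simp; omega
    · rename_i hd
      rw [List.takeWhile_cons_of_neg hd]
      simp
  · rename_i h
    rw [List.drop_eq_nil_of_le (by omega)]
    simp
termination_by cs.length - j

-- B's machine, related to toks, from each reachable buffer state
theorem bMachine (cs : List Char) :
    (∀ res : List Int,
      (if ((res, ([] : List Char)) |> (fun st => cs.foldl bStep st)).2.length > 1
       then (cs.foldl bStep (res, [])).1 ++ [(PySem.Int.ofChars? (cs.foldl bStep (res, [])).2).getD 0]
       else (cs.foldl bStep (res, [])).1) = res ++ (toks cs).map tval) ∧
    (∀ res : List Int,
      (if (cs.foldl bStep (res, ['-'])).2.length > 1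
       then (cs.foldl bStep (res, ['-'])).1 ++ [(PySem.Int.ofChars? (cs.foldl bStep (res, ['-'])).2).getD 0]
       else (cs.foldl bStep (res, ['-'])).1) = res ++ (toks ('-' :: cs)).map tval) ∧
    (∀ (res : List Int) (ds : List Char), ds ≠ [] →
      (if (cs.foldl bStep (res, '-' :: ds)).2.length > 1
       then (cs.foldl bStep (res, '-' :: ds)).1 ++ [(PySem.Int.ofChars? (cs.foldl bStep (res, '-' :: ds)).2).getD 0]
       else (cs.foldl bStep (res, '-' :: ds)).1)
        = res ++ [tval ('-' :: (ds ++ cs.takeWhile Char.isDigit))] ++ (toks (cs.dropWhile Char.isDigit)).map tval) := by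
  induction cs with
  | nil =>
    refine ⟨fun res => by simp [toks_nil], fun res => by simp [toks_cons, toks_nil], fun res ds hds => ?_⟩
    have : ('-' :: ds).length > 1 := by cases ds <;> simp_all
    simp [toks_nil, tval, hds]
  | cons c rest ih =>
    obtain ⟨ih1, ih2, ih3⟩ := ih
    refine ⟨fun res => ?_, fun res => ?_, fun res ds hds => ?_⟩
    · -- buffer empty
      rw [List.foldl_cons]
      show (if (rest.foldl bStep (bStep (res, []) c)).2.length > 1 then _ else _) = _
      by_cases hc : c = '-'
      · subst hc
        have : bStep (res, []) '-' = (res, ['-']) := by simp [bStep]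
        rw [this, ih2]
      · have : bStep (res, []) c = (res, []) := by simp [bStep, hc]
        rw [this, ih1, toks_cons_of_ne c rest hc]
    · -- buffer = "-"
      rw [List.foldl_cons]
      by_cases hd : c.isDigit
      · have : bStep (res, ['-']) c = (res, ['-', c]) := by simp [bStep, hd]
        rw [this]
        have h3 := ih3 res [c] (by simp)
        simp only [List.cons_append, List.nil_append] at h3 ⊢
        rw [h3]
        have ht : toks ('-' :: c :: rest) =
            ('-' :: c :: rest.takeWhile Char.isDigit) :: toks (rest.dropWhile Char.isDigit) := by
          rw [toks_cons, List.takeWhile_cons_of_pos hd, List.dropWhile_cons_of_pos hd, if_pos]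
          exact ⟨rfl, by simp⟩
        rw [ht]
        simp
      · have ht : toks ('-' :: c :: rest) = toks (c :: rest) := by
          rw [toks_cons ('-') (c :: rest), List.takeWhile_cons_of_neg hd, if_neg]
          simp
        rw [ht]
        by_cases hc : c = '-'
        · subst hc
          have : bStep (res, ['-']) '-' = (res, ['-']) := by simp [bStep]
          rw [this, ih2]
        · have : bStep (res, ['-']) c = (res, []) := by simp [bStep, hd, hc]
          rw [this, ih1, toks_cons_of_ne c rest hc]
    · -- buffer = "-" ++ ds, ds ≠ []
      rw [List.foldl_cons]
      by_cases hd : c.isDigit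
      · have : bStep (res, '-' :: ds) c = (res, '-' :: (ds ++ [c])) := by
          simp [bStep, hd]
        rw [this, ih3 res (ds ++ [c]) (by simp)]
        rw [List.takeWhile_cons_of_pos hd, List.dropWhile_cons_of_pos hd]
        simp
      · have hlen : ('-' :: ds).length > 1 := by cases ds <;> simp_all
        rw [List.takeWhile_cons_of_neg hd, List.dropWhile_cons_of_neg hd]
        simp only [List.append_nil]
        by_cases hc : c = '-'
        · subst hc
          have : bStep (res, '-' :: ds) '-' =
              (res ++ [(PySem.Int.ofChars? ('-' :: ds)).getD 0], ['-']) := by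
            simp [bStep, hds]
          rw [this, ih2]
          simp [tval]
        · have : bStep (res, '-' :: ds) c =
              (res ++ [(PySem.Int.ofChars? ('-' :: ds)).getD 0], []) := by
            simp [bStep, hd, hc, hds]
          rw [this, ih1, toks_cons_of_ne c rest hc]
          simp [tval]

theorem aLoop_eq (cs : List Char) (i : Nat) (acc : List Int) :
    aLoop cs i acc = acc ++ (toks (cs.drop i)).map tval := by
  unfold aLoop
  split
  · rename_i h
    have hdrop : cs.drop i = cs[i] :: cs.drop (i + 1) := List.drop_eq_getElem_cons h
    split
    · rename_i hcond
      obtain ⟨hminus, hnext⟩ := hcond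
      -- the character after '-' is a digit, so the digit run of drop (i+1) is nonempty
      have hi1 : i + 1 < cs.length := by
        by_contra hb
        rw [List.getElem?_eq_none (by omega)] at hnext
        simp [Option.any] at hnext
      have hd1 : Char.isDigit cs[i + 1] := by
        rw [List.getElem?_eq_getElem hi1] at hnext
        simpa [Option.any, isdigit_eq] using hnext
      have hdrop1 : cs.drop (i + 1) = cs[i + 1] :: cs.drop (i + 2) := List.drop_eq_getElem_cons hi1
      have htw : (cs.drop (i + 1)).takeWhile Char.isDigit ≠ [] := by
        rw [hdrop1, List.takeWhile_cons_of_pos hd1]; simp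
      set tw := (cs.drop (i + 1)).takeWhile Char.isDigit with htwdef
      have hscan : aScan cs (i + 1) = i + 1 + tw.length := aScan_eq cs (i + 1)
      -- the slice s[i:j] is exactly '-' :: tw
      have hslice : PySem.List.slice cs (some (i : Int)) (some ((aScan cs (i + 1) : Nat) : Int))
          = '-' :: tw := by
        rw [hscan]
        have : ((i + 1 + tw.length : Nat) : Int) = ((i : Nat) : Int) + ((1 + tw.length : Nat) : Int) := by
          push_cast; ring
        rw [this, PySem.List.slice_natCast_add, hdrop, hminus, Nat.add_comm 1 tw.length,
          List.take_succ_cons]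
        have hpre : tw <+: cs.drop (i + 1) := List.takeWhile_prefix _
        rw [← List.prefix_iff_eq_take.mp hpre]
      -- the tail after the token
      have hdw : (cs.drop (i + 1)).dropWhile Char.isDigit = cs.drop (aScan cs (i + 1)) := by
        rw [hscan]
        have hsplit : tw ++ (cs.drop (i + 1)).dropWhile Char.isDigit = cs.drop (i + 1) :=
          List.takeWhile_append_dropWhile
        have : cs.drop (i + 1 + tw.length) = (cs.drop (i + 1)).drop tw.length := by
          rw [List.drop_drop]
        rw [this]
        conv_rhs => rw [← hsplit]
        rw [List.drop_left]
      have htoks : toks (cs.drop i) =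
          ('-' :: tw) :: toks (cs.drop (aScan cs (i + 1))) := by
        rw [hdrop, hminus, ← hdw, toks_cons, if_pos ⟨rfl, htw⟩]
      rw [aLoop_eq cs (aScan cs (i + 1)) _, htoks]
      simp [tval, hslice]
    · rename_i hcond
      rw [aLoop_eq cs (i + 1) acc]
      have : toks (cs.drop i) = toks (cs.drop (i + 1)) := by
        rw [hdrop]
        by_cases hminus : cs[i] = '-'
        · have htw : (cs.drop (i + 1)).takeWhile Char.isDigit = [] := by
            by_cases hi1 : i + 1 < cs.length
            · have hdrop1 : cs.drop (i + 1) = cs[i + 1] :: cs.drop (i + 2) :=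
                List.drop_eq_getElem_cons hi1
              have hnd : ¬ Char.isDigit cs[i + 1] := by
                intro hdg
                exact hcond ⟨hminus, by
                  rw [List.getElem?_eq_getElem hi1]
                  simpa [Option.any, isdigit_eq] using hdg⟩
              rw [hdrop1, List.takeWhile_cons_of_neg hnd]
            · rw [List.drop_eq_nil_of_le (by omega)]; rfl
          rw [toks_cons, if_neg]
          simp [htw]
        · exact toks_cons_of_ne _ _ hminus
      rw [this]
  · rename_i h
    rw [List.drop_eq_nil_of_le (by omega)]
    simp [toks_nil]
termination_by cs.length - i
decreasing_by
  · have := aScan_ge cs (i + 1); omega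
  · omega

-- ===== VERDICT (by name: the statement is the Claim_ definition above) =====
theorem NegativeNumberInStrings_spec : Claim_equal_NegativeNumberInStrings := by
  intro s _
  show NegativeNumberInStrings s = NegativeNumberInStrings_alt s
  rw [NegativeNumberInStrings, NegativeNumberInStrings_alt, aLoop_eq]
  have h := (bMachine s.toList).1 []
  simpa using h.symm
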